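-- pv_equiv track=rewrite | github.com/digital-land/performance-prototype | application/blueprints/publisher/views.py | split_publishers
-- ===== SOURCE A (Python) =====
-- def split_publishers(organisations):
--     lpas = {
--         publisher: organisations[publisher]
--         for publisher in organisations.keys()
--         if "local-authority-eng" in publisher
--     }
--     dev_corps = {
--         publisher: organisations[publisher]
--         for publisher in organisations.keys()
--         if "development-corporation" in publisher
--     }
--     national_parks = {
--         publisher: organisations[publisher]
--         for publisher in organisations.keys()
--         if "national-park" in publisher
--     }
--     other = {
--         publisher: organisations[publisher]
--         for publisher in organisations.keys()
--         if not any(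
--             s in publisher
--             for s in ["local-authority", "development-corporation", "national-park"]
--         )
--     }
--     return {
--         "Development corporation": dev_corps,
--         "National parks": national_parks,
--         "Other publishers": other,
--         "Local planning authority": lpas,
--     }
-- ===== SOURCE B (Python) =====
-- CATEGORIES = [
--     ("development-corporation", "Development corporation"),
--     ("national-park", "National parks"),
--     ("local-authority-eng", "Local planning authority"),
-- ]
-- BASES = ["local-authority", "development-corporation", "national-park"]
--
--
-- def _labels(publisher):
--     # all result-dict labels this publisher belongs to (possibly several, possibly none)
--     labs = [label for sub, label in CATEGORIES if sub in publisher]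
--     if not any(b in publisher for b in BASES):
--         labs.append("Other publishers")
--     return labs
--
--
-- def split_publishers(organisations):
--     result = {
--         "Development corporation": {},
--         "National parks": {},
--         "Other publishers": {},
--         "Local planning authority": {},
--     }
--     for publisher, value in organisations.items():
--         for label in _labels(publisher):
--             result[label][publisher] = value
--     return result
-- ===== Notes on version B (the rewrite author's own statement) =====
-- stated objective: alternative
-- what changed: Table-driven multi-label grouping: a classifier maps each publisher to the list of category labels it belongs to, and one generic grouping loop routes each item into the pre-built labelled result dicts, replacing A's four per-category dict comprehensions that each rescan all keys.
import Mathlib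
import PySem

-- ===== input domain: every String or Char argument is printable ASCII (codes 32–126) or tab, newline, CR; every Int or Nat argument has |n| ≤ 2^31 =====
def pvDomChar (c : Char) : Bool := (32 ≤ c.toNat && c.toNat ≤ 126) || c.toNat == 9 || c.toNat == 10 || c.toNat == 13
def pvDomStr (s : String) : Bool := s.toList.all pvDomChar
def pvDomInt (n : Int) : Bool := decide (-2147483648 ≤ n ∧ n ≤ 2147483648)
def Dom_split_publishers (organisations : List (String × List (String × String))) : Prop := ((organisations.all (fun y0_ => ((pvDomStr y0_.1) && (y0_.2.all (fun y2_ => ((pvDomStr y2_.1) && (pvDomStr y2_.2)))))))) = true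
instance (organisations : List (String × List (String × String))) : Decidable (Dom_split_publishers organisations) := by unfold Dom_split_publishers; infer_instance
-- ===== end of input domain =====

-- B: table-driven multi-label grouping — a classifier yields each publisher's category labels and one
-- generic grouping loop routes items into the pre-built labelled dicts, replacing four comprehensions.
-- ===== PORT A =====
def split_publishers (organisations : List (String × List (String × String))) : List (String × List (String × List (String × String))) :=
  let lpas := organisations.filter (fun pv => PySem.Str.isIn "local-authority-eng" pv.1)
  let dev_corps := organisations.filter (fun pv => PySem.Str.isIn "development-corporation" pv.1)
  let national_parks := organisations.filter (fun pv => PySem.Str.isIn "national-park" pv.1)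
  let other := organisations.filter (fun pv =>
    !(["local-authority", "development-corporation", "national-park"].any
        (fun s => PySem.Str.isIn s pv.1)))
  [("Development corporation", dev_corps),
   ("National parks", national_parks),
   ("Other publishers", other),
   ("Local planning authority", lpas)]

-- ===== PORT B =====
def pvCategories : List (String × String) :=
  [("development-corporation", "Development corporation"),
   ("national-park", "National parks"),
   ("local-authority-eng", "Local planning authority")]

def pvBases : List String := ["local-authority", "development-corporation", "national-park"]

-- _labels: the category labels a publisher belongs to
def pvLabels (publisher : String) : List String :=
  let labs := (pvCategories.filter (fun sl => PySem.Str.isIn sl.1 publisher)).map (·.2)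
  if !(pvBases.any (fun b => PySem.Str.isIn b publisher)) then labs ++ ["Other publishers"] else labs

-- result[label][publisher] = value, label known present (a 4-key dict updated in place)
def pvAddTo (res : List (String × List (String × List (String × String)))) (lab : String)
    (pv : String × List (String × String)) : List (String × List (String × List (String × String))) :=
  res.map (fun e => if e.1 == lab then (e.1, e.2 ++ [pv]) else e)

def split_publishers_alt (organisations : List (String × List (String × String))) : List (String × List (String × List (String × String))) :=
  let init := [("Development corporation", ([] : List (String × List (String × String)))),
               ("National parks", []), ("Other publishers", []), ("Local planning authority", [])]
  organisations.foldl
    (fun res pv => (pvLabels pv.1).foldl (fun r lab => pvAddTo r lab pv) res) init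

-- ===== PRECONDITION & SPEC =====
def Spec_split_publishers (organisations : List (String × List (String × String))) (out : List (String × List (String × List (String × String)))) : Prop := out = split_publishers_alt organisations
instance (organisations : List (String × List (String × String))) (out : List (String × List (String × List (String × String)))) : Decidable (Spec_split_publishers organisations out) := by unfold Spec_split_publishers; infer_instance

-- ===== CLAIM (what is proved, stated in full; the proofs are below) =====
def Claim_equal_split_publishers : Prop := ∀ (organisations : List (String × List (String × String))), Dom_split_publishers organisations → Spec_split_publishers organisations (split_publishers organisations)

-- ===== LEMMAS AND PROOFS =====
theorem pv_step (a b c d : List (String × List (String × String))) (pv : String × List (String × String)) :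
    (pvLabels pv.1).foldl (fun r lab => pvAddTo r lab pv)
      [("Development corporation", a), ("National parks", b),
       ("Other publishers", c), ("Local planning authority", d)]
    = [("Development corporation", a ++ if PySem.Str.isIn "development-corporation" pv.1 then [pv] else []),
       ("National parks", b ++ if PySem.Str.isIn "national-park" pv.1 then [pv] else []),
       ("Other publishers", c ++ if !(["local-authority", "development-corporation", "national-park"].any (fun s => PySem.Str.isIn s pv.1)) then [pv] else []),
       ("Local planning authority", d ++ if PySem.Str.isIn "local-authority-eng" pv.1 then [pv] else [])] := by
  simp only [pvLabels, pvCategories, pvBases, List.filter_cons, List.filter_nil,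
    List.any_cons, List.any_nil]
  split_ifs <;> simp_all [pvAddTo, List.foldl]

theorem pv_loop (l : List (String × List (String × String)))
    (a b c d : List (String × List (String × String))) :
    l.foldl (fun res pv => (pvLabels pv.1).foldl (fun r lab => pvAddTo r lab pv) res)
      [("Development corporation", a), ("National parks", b),
       ("Other publishers", c), ("Local planning authority", d)]
    = [("Development corporation", a ++ l.filter (fun pv => PySem.Str.isIn "development-corporation" pv.1)),
       ("National parks", b ++ l.filter (fun pv => PySem.Str.isIn "national-park" pv.1)),
       ("Other publishers", c ++ l.filter (fun pv => !(["local-authority", "development-corporation", "national-park"].any (fun s => PySem.Str.isIn s pv.1)))),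
       ("Local planning authority", d ++ l.filter (fun pv => PySem.Str.isIn "local-authority-eng" pv.1))] := by
  induction l generalizing a b c d with
  | nil => simp
  | cons x xs ih =>
    rw [List.foldl_cons, pv_step, ih]
    simp only [List.filter_cons]
    split_ifs <;> simp_all

-- ===== VERDICT (by name: the statement is the Claim_ definition above) =====
theorem split_publishers_spec : Claim_equal_split_publishers := by
  intro organisations _
  unfold Spec_split_publishers split_publishers split_publishers_alt
  rw [pv_loop]
  simp
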